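-- pv_equiv track=rewrite | github.com/feladie/info-206 | hw4/hw4.anna.cho.py | UpdateWords
-- ===== SOURCE A (Python) =====
-- def UpdateWords(data, clean_text, length, book_index):
-- 	"""Takes in a dictionary of word counts, cleaned text, number of books in the catalog, and current book's index.
-- 	Returns an updated word count dictionary for the book in question.
-- 	"""
-- 	total_words = len(clean_text)	# total number of words
-- 	for idx in range(total_words):
-- 		word = clean_text[idx]
-- 		# Check if word is already in data dictionary.
-- 		if word not in data:
-- 			# Add word to data with list with length equal to the number of books in the list
-- 			count_list = [0] * length	# Create a new list of word counts.
-- 			count_list[book_index] += 1	# Increment the count for the index of the book in question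
-- 			data[word] = count_list	# Update the dictionary of word counts.
-- 		else:	# Word is already in dictionary
-- 			data[word][book_index] += 1	# Increase word count at the correct index of the book.
-- 	return data
-- ===== SOURCE B (Python) =====
-- def UpdateWords(data, clean_text, length, book_index):
--     """Three-phase rewrite: (1) tally clean_text into a local frequency dict;
--     (2) sweep the existing rows of data once, adding each matching frequency and
--     removing it from the tally; (3) append a fresh row for each word left over.
--     Same in-place mutation of data and same first-seen key order as the original."""
--     freq = {}
--     for word in clean_text:
--         freq[word] = freq.get(word, 0) + 1
--     for word in data:
--         if word in freq:
--             data[word][book_index] += freq.pop(word)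
--     for word, n in freq.items():
--         row = [0] * length
--         row[book_index] = n
--         data[word] = row
--     return data
-- ===== Notes on version B (the rewrite author's own statement) =====
-- stated objective: alternative
-- what changed: Instead of A's single loop that updates the shared data dict once per token, B runs three phases: it tallies clean_text into a local frequency dict, then sweeps data's existing rows once (adding each matching frequency and popping it from the tally), and finally appends a fresh row for every leftover new word, preserving the same in-place mutation and first-seen key order.
import Mathlib
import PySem

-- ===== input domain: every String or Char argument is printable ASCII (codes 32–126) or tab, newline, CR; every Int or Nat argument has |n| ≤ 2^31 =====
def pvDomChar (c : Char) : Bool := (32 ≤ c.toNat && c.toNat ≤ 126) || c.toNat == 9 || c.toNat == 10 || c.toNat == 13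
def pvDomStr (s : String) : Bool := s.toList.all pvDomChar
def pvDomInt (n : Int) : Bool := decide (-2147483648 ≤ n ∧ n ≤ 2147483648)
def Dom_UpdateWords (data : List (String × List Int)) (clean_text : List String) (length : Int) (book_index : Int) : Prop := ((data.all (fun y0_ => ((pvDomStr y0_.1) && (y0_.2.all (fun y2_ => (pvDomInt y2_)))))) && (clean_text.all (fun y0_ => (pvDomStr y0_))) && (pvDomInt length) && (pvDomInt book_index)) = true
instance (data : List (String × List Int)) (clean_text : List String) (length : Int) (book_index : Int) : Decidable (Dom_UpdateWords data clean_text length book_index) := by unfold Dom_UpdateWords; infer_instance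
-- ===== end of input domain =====

-- B is a three-phase rewrite (tally clean_text locally, sweep data's existing rows once, append
-- rows for leftover new words) — alternative decomposition, same cost; both versions mutate `data`
-- in place in Python — the equivalence proved here is about the returned dictionary (the same object).


-- ===== PORT A =====
-- `l[i] += n` on a Python list, hand-ported: exact (via PySem.List.pyIdx?) where Python succeeds;
-- identity where Python would raise IndexError (those inputs are excluded by Pre_UpdateWords).
def pyBump (l : List Int) (i : Int) (n : Int) : List Int :=
  match PySem.List.pyIdx? l.length i with
  | some j => l.set j (l.getD j 0 + n)
  | none => l

-- loop body of A: one word of clean_text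
def stepA (length book_index : Int) (d : PySem.Dict String (List Int)) (word : String) : PySem.Dict String (List Int) :=
  if d.contains word = false then
    d.insert word (pyBump (List.replicate length.toNat 0) book_index 1)
  else
    d.modify word [] (fun l => pyBump l book_index 1)

def UpdateWords (data : List (String × List Int)) (clean_text : List String) (length : Int) (book_index : Int) : List (String × List Int) :=
  (clean_text.foldl (stepA length book_index) (PySem.Dict.mk data)).items

-- ===== PORT B =====
-- `row[book_index] = n`, hand-ported: exact where Python succeeds; identity where Python
-- would raise IndexError (excluded by Pre_UpdateWords).
def pySetAt (l : List Int) (i : Int) (n : Int) : List Int :=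
  match PySem.List.pyIdx? l.length i with
  | some j => l.set j n
  | none => l

-- body of B's second loop (`for word in data`): the pair state is (data, freq);
-- `data[word][book_index] += freq.pop(word)` when word is in freq
def sweepStep (book_index : Int) (st : PySem.Dict String (List Int) × PySem.Dict String Int) (w : String) : PySem.Dict String (List Int) × PySem.Dict String Int :=
  if st.2.contains w then
    (st.1.modify w [] (fun l => pyBump l book_index (st.2.getD w 0)), st.2.erase w)
  else st

-- body of B's third loop: `row = [0]*length; row[book_index] = n; data[word] = row`
def growStep (length book_index : Int) (dc : PySem.Dict String (List Int)) (p : String × Int) : PySem.Dict String (List Int) :=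
  dc.insert p.1 (pySetAt (List.replicate length.toNat 0) book_index p.2)

def UpdateWords_alt (data : List (String × List Int)) (clean_text : List String) (length : Int) (book_index : Int) : List (String × List Int) :=
  let freq := clean_text.foldl (fun f w => f.insert w (f.getD w 0 + 1)) (PySem.Dict.empty : PySem.Dict String Int)
  let st := (PySem.Dict.mk data).keys.foldl (sweepStep book_index) (PySem.Dict.mk data, freq)
  (st.2.items.foldl (growStep length book_index) st.1).items

-- ===== PRECONDITION & SPEC =====
-- Pre_ requires (a) data's keys distinct — `data` is a Python dict, whose keys are necessarily
-- distinct, so duplicate-key association lists represent no Python input at all — and (b) exactly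
-- the inputs on which the Python raises no IndexError: for each word of clean_text, book_index is
-- a valid Python index into that word's existing count list (first match in data), or into
-- [0]*length for a word not yet in data.
def Pre_UpdateWords (data : List (String × List Int)) (clean_text : List String) (length : Int) (book_index : Int) : Prop :=
  (data.map Prod.fst).Nodup ∧
  ∀ w ∈ clean_text,
    PySem.Raise.InRange (((PySem.Dict.mk data).get? w).elim length.toNat List.length) book_index
instance (data : List (String × List Int)) (clean_text : List String) (length : Int) (book_index : Int) : Decidable (Pre_UpdateWords data clean_text length book_index) := by unfold Pre_UpdateWords; infer_instance

def pvWitness_UpdateWords : (List (String × List Int)) × List String × Int × Int :=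
  ([("the", [1, 0])], ["a", "the", "a"], 2, 1)

def Spec_UpdateWords (data : List (String × List Int)) (clean_text : List String) (length : Int) (book_index : Int) (out : List (String × List Int)) : Prop := out = UpdateWords_alt data clean_text length book_index
instance (data : List (String × List Int)) (clean_text : List String) (length : Int) (book_index : Int) (out : List (String × List Int)) : Decidable (Spec_UpdateWords data clean_text length book_index out) := by unfold Spec_UpdateWords; infer_instance

-- ===== CLAIM (what is proved, stated in full; the proofs are below) =====
def Claim_equal_UpdateWords : Prop := ∀ (data : List (String × List Int)) (clean_text : List String) (length : Int) (book_index : Int), Dom_UpdateWords data clean_text length book_index → Pre_UpdateWords data clean_text length book_index → Spec_UpdateWords data clean_text length book_index (UpdateWords data clean_text length book_index)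

-- ===== LEMMAS AND PROOFS =====

theorem pyIdx?_lt {n : Nat} {i : Int} {j : Nat} (h : PySem.List.pyIdx? n i = some j) : j < n := by
  unfold PySem.List.pyIdx? at h
  split_ifs at h <;> simp_all <;> omega

theorem pySetAt_replicate (k : Nat) (i n : Int) :
    pySetAt (List.replicate k 0) i n = pyBump (List.replicate k 0) i n := by
  unfold pySetAt pyBump
  cases h : PySem.List.pyIdx? (List.replicate k (0:Int)).length i with
  | none => rfl
  | some j =>
    simp only []
    congr 1
    simp [List.getD, List.getElem?_replicate]
    split <;> rfl

theorem pyBump_pyBump (l : List Int) (i n m : Int) :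
    pyBump (pyBump l i n) i m = pyBump l i (n + m) := by
  unfold pyBump
  cases h : PySem.List.pyIdx? l.length i with
  | none => simp [h]
  | some j =>
    have hj : j < l.length := pyIdx?_lt h
    simp only [List.length_set, h, List.set_set]
    congr 1
    have : (l.set j (l.getD j 0 + n)).getD j 0 = l.getD j 0 + n := by
      simp [List.getD, hj]
    rw [this]; ring

theorem pyBump_pySetAt (l : List Int) (i n m : Int) :
    pyBump (pySetAt l i n) i m = pySetAt l i (n + m) := by
  unfold pySetAt pyBump
  cases h : PySem.List.pyIdx? l.length i with
  | none => simp [h]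
  | some j =>
    have hj : j < l.length := pyIdx?_lt h
    simp only [List.length_set, h, List.set_set]
    congr 1
    have : (l.set j n).getD j 0 = n := by
      simp [List.getD, hj]
    rw [this]

-- proof-only bridging step: one (word, n) pair folded into the shared dict
def stepB (length book_index : Int) (d : PySem.Dict String (List Int)) (p : String × Int) : PySem.Dict String (List Int) :=
  if d.contains p.1 = false then
    d.insert p.1 (pySetAt (List.replicate length.toNat 0) book_index p.2)
  else
    d.modify p.1 [] (fun l => pyBump l book_index p.2)

theorem stepA_eq_stepB_one (L i : Int) (d : PySem.Dict String (List Int)) (w : String) :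
    stepA L i d w = stepB L i d (w, 1) := by
  unfold stepA stepB
  rw [pySetAt_replicate]

theorem contains_stepB_self (L i : Int) (d : PySem.Dict String (List Int)) (w : String) (n : Int) :
    (stepB L i d (w, n)).contains w = true := by
  unfold stepB PySem.Dict.modify
  split_ifs <;> simp

-- two inserts at distinct keys commute when the first key is already present (its insert is in place)
theorem insert_comm_of_contains {d : PySem.Dict String (List Int)} {w w' : String}
    (hw : d.contains w = true) (hne : w' ≠ w) (v v' : List Int) :
    (d.insert w v).insert w' v' = (d.insert w' v').insert w v := by
  have hww' : (w' == w) = false := by simp [hne]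
  have hw'w : (w == w') = false := by simp [Ne.symm hne]
  cases hc' : d.contains w' with
  | true =>
    apply PySem.Dict.ext
    rw [PySem.Dict.items_insert_of_contains _ _ (by rw [PySem.Dict.contains_insert, hww', hc']; rfl),
        PySem.Dict.items_insert_of_contains _ _ hw,
        PySem.Dict.items_insert_of_contains _ _ (by rw [PySem.Dict.contains_insert, hw'w, hw]; rfl),
        PySem.Dict.items_insert_of_contains _ _ hc',
        List.map_map, List.map_map]
    apply List.map_congr_left
    intro p _
    by_cases hp : p.1 = w
    · simp [Function.comp, hp, hw'w]
    · by_cases hp' : p.1 = w'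
      · simp [Function.comp, hp', hww']
      · simp [Function.comp, hp, hp']
  | false =>
    apply PySem.Dict.ext
    rw [PySem.Dict.items_insert_of_not_contains _ _ (by rw [PySem.Dict.contains_insert, hww', hc']; rfl),
        PySem.Dict.items_insert_of_contains _ _ hw,
        PySem.Dict.items_insert_of_contains _ _ (by rw [PySem.Dict.contains_insert, hw'w, hw]; rfl),
        PySem.Dict.items_insert_of_not_contains _ _ hc',
        List.map_append]
    simp [hne]

-- folding word w once more into the shared dict absorbs into the pending (w, n) pair
theorem stepA_stepB_absorb (L i : Int) (d : PySem.Dict String (List Int)) (w : String) (n : Int) :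
    stepA L i (stepB L i d (w, n)) w = stepB L i d (w, n + 1) := by
  cases hc : d.contains w with
  | false =>
    have hB : stepB L i d (w, n) = d.insert w (pySetAt (List.replicate L.toNat 0) i n) := by
      unfold stepB
      rw [if_pos (show d.contains (w, n).1 = false from hc)]
    have hB' : stepB L i d (w, n + 1) = d.insert w (pySetAt (List.replicate L.toNat 0) i (n + 1)) := by
      unfold stepB
      rw [if_pos (show d.contains (w, n + 1).1 = false from hc)]
    rw [hB, hB']
    unfold stepA PySem.Dict.modify
    rw [if_neg (by rw [PySem.Dict.contains_insert]; simp)]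
    rw [PySem.Dict.getD_insert_self, PySem.Dict.insert_insert_self]
    exact congrArg (fun v => d.insert w v) (pyBump_pySetAt _ i n 1)
  | true =>
    have hB : stepB L i d (w, n) = d.insert w (pyBump (d.getD w []) i n) := by
      unfold stepB PySem.Dict.modify
      rw [if_neg (by simp [hc])]
    have hB' : stepB L i d (w, n + 1) = d.insert w (pyBump (d.getD w []) i (n + 1)) := by
      unfold stepB PySem.Dict.modify
      rw [if_neg (by simp [hc])]
    rw [hB, hB']
    unfold stepA PySem.Dict.modify
    rw [if_neg (by rw [PySem.Dict.contains_insert]; simp)]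
    rw [PySem.Dict.getD_insert_self, PySem.Dict.insert_insert_self]
    exact congrArg (fun v => d.insert w v) (pyBump_pyBump _ i n 1)

-- a stepA on key w commutes with a stepB on a different key, provided w is already present
theorem stepA_stepB_comm (L i : Int) (d : PySem.Dict String (List Int)) (w : String)
    (p : String × Int) (hne : p.1 ≠ w) (hw : d.contains w = true) :
    stepA L i (stepB L i d p) w = stepB L i (stepA L i d w) p := by
  obtain ⟨w', m⟩ := p
  simp only at hne
  have hwne : w ≠ w' := Ne.symm hne
  have hA : stepA L i d w = d.insert w (pyBump (d.getD w []) i 1) := by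
    unfold stepA PySem.Dict.modify
    rw [if_neg (by simp [hw])]
  cases hc' : d.contains w' with
  | true =>
    have hB : stepB L i d (w', m) = d.insert w' (pyBump (d.getD w' []) i m) := by
      unfold stepB PySem.Dict.modify
      rw [if_neg (by simp [hc'])]
    rw [hA, hB]
    have h1 : stepA L i (d.insert w' (pyBump (d.getD w' []) i m)) w
        = (d.insert w' (pyBump (d.getD w' []) i m)).insert w (pyBump (d.getD w []) i 1) := by
      unfold stepA PySem.Dict.modify
      rw [if_neg (by rw [PySem.Dict.contains_insert]; simp [hw]),
          PySem.Dict.getD_insert_of_ne _ _ _ hwne]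
    have h2 : stepB L i (d.insert w (pyBump (d.getD w []) i 1)) (w', m)
        = (d.insert w (pyBump (d.getD w []) i 1)).insert w' (pyBump (d.getD w' []) i m) := by
      unfold stepB PySem.Dict.modify
      rw [if_neg (by rw [PySem.Dict.contains_insert]; simp [hc'])]
      rw [PySem.Dict.getD_insert_of_ne _ _ _ hne]
    rw [h1, h2, insert_comm_of_contains hw hne]
  | false =>
    have hB : stepB L i d (w', m) = d.insert w' (pySetAt (List.replicate L.toNat 0) i m) := by
      unfold stepB
      rw [if_pos (by simp [hc'])]
    rw [hA, hB]
    have h1 : stepA L i (d.insert w' (pySetAt (List.replicate L.toNat 0) i m)) w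
        = (d.insert w' (pySetAt (List.replicate L.toNat 0) i m)).insert w (pyBump (d.getD w []) i 1) := by
      unfold stepA PySem.Dict.modify
      rw [if_neg (by rw [PySem.Dict.contains_insert]; simp [hw]),
          PySem.Dict.getD_insert_of_ne _ _ _ hwne]
    have h2 : stepB L i (d.insert w (pyBump (d.getD w []) i 1)) (w', m)
        = (d.insert w (pyBump (d.getD w []) i 1)).insert w' (pySetAt (List.replicate L.toNat 0) i m) := by
      unfold stepB
      rw [if_pos (by rw [PySem.Dict.contains_insert]; simp [hne, hc'])]
    rw [h1, h2, insert_comm_of_contains hw hne]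

theorem stepA_foldl_comm (L i : Int) (w : String) :
    ∀ (post : List (String × Int)) (d : PySem.Dict String (List Int)),
      d.contains w = true → (∀ p ∈ post, p.1 ≠ w) →
      stepA L i (post.foldl (stepB L i) d) w = post.foldl (stepB L i) (stepA L i d w) := by
  intro post
  induction post with
  | nil => intro d _ _; rfl
  | cons p ps ih =>
    intro d hw hkeys
    have hp : p.1 ≠ w := hkeys p (by simp)
    have hcont : (stepB L i d p).contains w = true := by
      unfold stepB PySem.Dict.modify
      split_ifs <;> rw [PySem.Dict.contains_insert] <;> simp [hw]
    calc stepA L i ((p :: ps).foldl (stepB L i) d) w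
        = stepA L i (ps.foldl (stepB L i) (stepB L i d p)) w := rfl
      _ = ps.foldl (stepB L i) (stepA L i (stepB L i d p) w) :=
          ih _ hcont (fun q hq => hkeys q (by simp [hq]))
      _ = ps.foldl (stepB L i) (stepB L i (stepA L i d w) p) := by
          rw [stepA_stepB_comm L i d w p hp hw]
      _ = (p :: ps).foldl (stepB L i) (stepA L i d w) := rfl

-- KEY: incrementing w in the frequency dict and replaying it equals replaying it and then one stepA on w
theorem key_lemma (L i : Int) (fr : PySem.Dict String Int) (w : String)
    (d : PySem.Dict String (List Int)) (hnd : fr.keys.Nodup) :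
    ((fr.insert w (fr.getD w 0 + 1)).items.foldl (stepB L i) d)
      = stepA L i (fr.items.foldl (stepB L i) d) w := by
  cases hc : fr.contains w with
  | false =>
    rw [PySem.Dict.getD_of_not_contains _ _ hc,
        PySem.Dict.items_insert_of_not_contains _ _ hc, List.foldl_append]
    simp only [List.foldl_cons, List.foldl_nil]
    rw [stepA_eq_stepB_one]
    norm_num
  | true =>
    obtain ⟨n, hget⟩ : ∃ n, fr.get? w = some n := by
      have := PySem.Dict.contains_eq_isSome_get? (d := fr) (k := w)
      rw [hc] at this
      exact Option.isSome_iff_exists.mp this.symm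
    have hmem : (w, n) ∈ fr.items := PySem.Dict.mem_items_of_get?_eq_some fr hget
    have hgetD : fr.getD w 0 = n := PySem.Dict.getD_of_mem_items _ hmem hnd 0
    obtain ⟨pre, post, hsplit⟩ := List.append_of_mem hmem
    have hkeys : ((pre ++ (w, n) :: post).map Prod.fst).Nodup := by
      have : fr.keys = fr.items.map Prod.fst := rfl
      rw [this, hsplit] at hnd
      exact hnd
    have hprepost : (∀ p ∈ pre, p.1 ≠ w) ∧ (∀ p ∈ post, p.1 ≠ w) := by
      simp only [List.map_append, List.map_cons] at hkeys
      have hd := List.disjoint_of_nodup_append hkeys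
      have h2 := (List.nodup_append.mp hkeys).2.1
      constructor
      · intro p hp h
        exact hd (List.mem_map_of_mem hp) (by simp [h])
      · intro p hp h
        exact (List.nodup_cons.mp h2).1 (h ▸ List.mem_map_of_mem hp)
    obtain ⟨hpre, hpost⟩ := hprepost
    have hitems : (fr.insert w (fr.getD w 0 + 1)).items = pre ++ (w, n + 1) :: post := by
      rw [PySem.Dict.items_insert_of_contains _ _ hc, hgetD, hsplit, List.map_append, List.map_cons]
      congr 1
      · calc pre.map (fun p => if (p.1 == w) = true then (w, n + 1) else p)
            = pre.map id := List.map_congr_left (fun p hp => by simp only [id_eq]; rw [if_neg (by simp [hpre p hp])])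
          _ = pre := List.map_id _
      · congr 1
        · simp
        · calc post.map (fun p => if (p.1 == w) = true then (w, n + 1) else p)
              = post.map id := List.map_congr_left (fun p hp => by simp only [id_eq]; rw [if_neg (by simp [hpost p hp])])
            _ = post := List.map_id _
    rw [hitems, hsplit, List.foldl_append, List.foldl_append]
    simp only [List.foldl_cons]
    set d1 := pre.foldl (stepB L i) d with hd1
    have hcont : (stepB L i d1 (w, n)).contains w = true := contains_stepB_self L i d1 w n
    rw [stepA_foldl_comm L i w post (stepB L i d1 (w, n)) hcont hpost,
        stepA_stepB_absorb]

theorem main_lemma (L i : Int) :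
    ∀ (ws : List String) (fr : PySem.Dict String Int) (d : PySem.Dict String (List Int)),
      fr.keys.Nodup →
      ((ws.foldl (fun f w => f.insert w (f.getD w 0 + 1)) fr).items.foldl (stepB L i) d)
        = ws.foldl (stepA L i) (fr.items.foldl (stepB L i) d) := by
  intro ws
  induction ws with
  | nil => intro fr d _; rfl
  | cons w ws ih =>
    intro fr d hnd
    simp only [List.foldl_cons]
    rw [ih (fr.insert w (fr.getD w 0 + 1)) d (PySem.Dict.nodup_keys_insert _ _ _ hnd),
        key_lemma L i fr w d hnd]

-- ---- bridge from the stepB fold to B's three phases ----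

-- closed form of one stepB application, as a function on items entries
def bumpBy (i : Int) (ps : List (String × Int)) (kv : String × List Int) : String × List Int :=
  match ps.find? (fun p => p.1 == kv.1) with
  | some p => (kv.1, pyBump kv.2 i p.2)
  | none => kv

theorem find?_filter_ne {w w' : String} (h : w' ≠ w) (l : List (String × Int)) :
    (l.filter (fun p => !(p.1 == w))).find? (fun p => p.1 == w') = l.find? (fun p => p.1 == w') := by
  induction l with
  | nil => rfl
  | cons p t ih =>
    by_cases hp : p.1 = w
    · have h2 : (w == w') = false := by simp [Ne.symm h]
      simp [hp, List.find?_cons, h2, ih, Ne.symm h]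
    · by_cases hp' : p.1 = w'
      · simp [hp, List.find?_cons, hp', h, Ne.symm h]
      · simp [hp, List.find?_cons, hp', ih, h, Ne.symm h]

theorem any_filter_ne {w w' : String} (h : w' ≠ w) (l : List (String × Int)) :
    (l.filter (fun p => !(p.1 == w))).any (fun p => p.1 == w') = l.any (fun p => p.1 == w') := by
  induction l with
  | nil => rfl
  | cons p t ih =>
    by_cases hp : p.1 = w
    · have h2 : ¬(w = w') := fun e => h e.symm
      simp [hp, ih, h2]
    · simp [hp, ih]

theorem items_erase (f : PySem.Dict String Int) (w : String) :
    (f.erase w).items = f.items.filter (fun p => !(p.1 == w)) := rfl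

theorem contains_erase_of_ne (f : PySem.Dict String Int) {w w' : String} (h : w' ≠ w) :
    (f.erase w).contains w' = f.contains w' :=
  any_filter_ne h f.items

theorem getD_erase_of_ne (f : PySem.Dict String Int) {w w' : String} (h : w' ≠ w) (d0 : Int) :
    (f.erase w).getD w' d0 = f.getD w' d0 := by
  rw [PySem.Dict.getD_eq_get?_getD, PySem.Dict.getD_eq_get?_getD]
  show (((f.items.filter (fun p => !(p.1 == w))).find? (fun p => p.1 == w')).map Prod.snd).getD d0 = _
  rw [find?_filter_ne h]
  rfl

theorem nodup_keys_erase (f : PySem.Dict String Int) (w : String) (h : f.keys.Nodup) :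
    (f.erase w).keys.Nodup := by
  have : (f.erase w).keys = (f.items.filter (fun p => !(p.1 == w))).map Prod.fst := rfl
  rw [this]
  exact List.Nodup.sublist (List.Sublist.map _ List.filter_sublist) h

theorem contains_of_mem_items (f : PySem.Dict String Int) {p : String × Int} (hp : p ∈ f.items) :
    f.contains p.1 = true :=
  (PySem.Dict.contains_iff_mem_keys f p.1).mpr (PySem.Dict.mem_keys_of_mem_items f hp)

theorem fst_ne_of_not_mem_map {α : Type} {w : String} {rest : List (String × α)}
    (hw : w ∉ rest.map Prod.fst) {p : String × α} (hp : p ∈ rest) : p.1 ≠ w := by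
  intro h
  apply hw
  have : p.1 ∈ rest.map Prod.fst := List.mem_map_of_mem hp
  rwa [h] at this

-- closed form of the stepB fold: existing rows are bumped in place, new words append in order
theorem foldl_stepB_items (L i : Int) :
    ∀ (ps : List (String × Int)) (d : PySem.Dict String (List Int)),
      (ps.map Prod.fst).Nodup → d.keys.Nodup →
      (ps.foldl (stepB L i) d).items
        = d.items.map (bumpBy i ps)
          ++ (ps.filter (fun p => !(d.contains p.1))).map
              (fun p => (p.1, pySetAt (List.replicate L.toNat 0) i p.2)) := by
  intro ps
  induction ps with
  | nil =>
    intro d _ _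
    simp only [List.foldl_nil, List.filter_nil, List.map_nil, List.append_nil]
    rw [show List.map (bumpBy i []) d.items = d.items.map id from
      List.map_congr_left (fun kv _ => rfl), List.map_id]
  | cons q rest ih =>
    intro d hps hd
    obtain ⟨w, n⟩ := q
    simp only [List.map_cons] at hps
    obtain ⟨hwrest, hrest⟩ := List.nodup_cons.mp hps
    have hfind_rest_w : rest.find? (fun p => p.1 == w) = none := by
      rw [List.find?_eq_none]
      intro p hp
      simp only [beq_iff_eq]
      exact fst_ne_of_not_mem_map hwrest hp
    cases hc : d.contains w with
    | true =>
      have hstep : stepB L i d (w, n) = d.insert w (pyBump (d.getD w []) i n) := by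
        unfold stepB PySem.Dict.modify
        rw [if_neg (by simp [hc])]
      have hd' : (d.insert w (pyBump (d.getD w []) i n)).keys.Nodup :=
        PySem.Dict.nodup_keys_insert _ _ _ hd
      rw [List.foldl_cons, hstep, ih _ hrest hd',
          PySem.Dict.items_insert_of_contains _ _ hc, List.map_map]
      congr 1
      · apply List.map_congr_left
        intro kv hkv
        obtain ⟨k, vrow⟩ := kv
        by_cases hkw : k = w
        · subst hkw
          have hget : d.getD k [] = vrow := PySem.Dict.getD_of_mem_items d hkv hd []
          have hfind3 : ((k, n) :: rest).find? (fun p => p.1 == k) = some (k, n) := by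
            simp [List.find?_cons]
          simp [bumpBy, hfind3, hfind_rest_w, hget]
        · have hkw1 : (k == w) = false := by simp [hkw]
          have hfindc : ((w, n) :: rest).find? (fun p => p.1 == k) = rest.find? (fun p => p.1 == k) := by
            simp [List.find?_cons, Ne.symm hkw]
          simp [bumpBy, hkw1, hfindc, hkw]
      · rw [List.filter_cons]
        simp only [hc, Bool.not_true, if_false]
        apply congrArg
        apply List.filter_congr
        intro p hp
        have hpw : p.1 ≠ w := fst_ne_of_not_mem_map hwrest hp
        rw [PySem.Dict.contains_insert, show (p.1 == w) = false by simp [hpw], Bool.false_or]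
    | false =>
      have hstep : stepB L i d (w, n) = d.insert w (pySetAt (List.replicate L.toNat 0) i n) := by
        unfold stepB
        rw [if_pos (by simp [hc])]
      have hd' : (d.insert w (pySetAt (List.replicate L.toNat 0) i n)).keys.Nodup :=
        PySem.Dict.nodup_keys_insert _ _ _ hd
      rw [List.foldl_cons, hstep, ih _ hrest hd',
          PySem.Dict.items_insert_of_not_contains _ _ hc, List.map_append]
      have hkv_ne : ∀ kv ∈ d.items, (kv : String × List Int).1 ≠ w := by
        intro kv hkv h
        have : d.contains kv.1 = true :=
          (PySem.Dict.contains_iff_mem_keys d kv.1).mpr (PySem.Dict.mem_keys_of_mem_items d hkv)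
        rw [h, hc] at this
        exact Bool.false_ne_true this
      have hmap1 : d.items.map (bumpBy i rest) = d.items.map (bumpBy i ((w, n) :: rest)) := by
        apply List.map_congr_left
        intro kv hkv
        have hfindc : ((w, n) :: rest).find? (fun p => p.1 == kv.1) = rest.find? (fun p => p.1 == kv.1) := by
          simp [List.find?_cons, Ne.symm (hkv_ne kv hkv)]
        simp only [bumpBy, hfindc]
      have hmap2 : [(w, pySetAt (List.replicate L.toNat 0) i n)].map (bumpBy i rest)
          = [(w, pySetAt (List.replicate L.toNat 0) i n)] := by
        simp [bumpBy, hfind_rest_w]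
      have hfilter : rest.filter (fun p => !((d.insert w (pySetAt (List.replicate L.toNat 0) i n)).contains p.1))
          = rest.filter (fun p => !(d.contains p.1)) := by
        apply List.filter_congr
        intro p hp
        have hpw : p.1 ≠ w := fst_ne_of_not_mem_map hwrest hp
        rw [PySem.Dict.contains_insert, show (p.1 == w) = false by simp [hpw], Bool.false_or]
      rw [hmap1, hmap2, hfilter, List.filter_cons]
      simp only [hc, Bool.not_false, if_true, List.map_cons]
      rw [List.append_assoc]
      rfl

-- closed form of B's sweep loop (phase 2)
theorem sweep_items (i : Int) :
    ∀ (ks : List String) (dc : PySem.Dict String (List Int)) (f : PySem.Dict String Int),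
      ks.Nodup → dc.keys.Nodup → f.keys.Nodup → (∀ w ∈ ks, dc.contains w = true) →
      (ks.foldl (sweepStep i) (dc, f)).1.items
          = dc.items.map (fun kv =>
              if decide (kv.1 ∈ ks) && f.contains kv.1 then (kv.1, pyBump kv.2 i (f.getD kv.1 0)) else kv)
        ∧ (ks.foldl (sweepStep i) (dc, f)).2.items
          = f.items.filter (fun p => !(decide (p.1 ∈ ks))) := by
  intro ks
  induction ks with
  | nil =>
    intro dc f _ _ _ _
    constructor
    · simp
    · simp
  | cons w ks ih =>
    intro dc f hks hdc hf hall
    obtain ⟨hw_notin, hks'⟩ := List.nodup_cons.mp hks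
    cases hc : f.contains w with
    | true =>
      have hdcw : dc.contains w = true := hall w (List.mem_cons_self)
      have hstep : sweepStep i (dc, f) w
          = (dc.insert w (pyBump (dc.getD w []) i (f.getD w 0)), f.erase w) := by
        unfold sweepStep PySem.Dict.modify
        rw [if_pos hc]
      have hdc' : (dc.insert w (pyBump (dc.getD w []) i (f.getD w 0))).keys.Nodup :=
        PySem.Dict.nodup_keys_insert _ _ _ hdc
      have hf' : (f.erase w).keys.Nodup := nodup_keys_erase f w hf
      have hall' : ∀ u ∈ ks, (dc.insert w (pyBump (dc.getD w []) i (f.getD w 0))).contains u = true := by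
        intro u hu
        rw [PySem.Dict.contains_insert, hall u (List.mem_cons_of_mem _ hu), Bool.or_true]
      obtain ⟨h1, h2⟩ := ih _ _ hks' hdc' hf' hall'
      simp only [List.foldl_cons, hstep]
      constructor
      · rw [h1, PySem.Dict.items_insert_of_contains _ _ hdcw, List.map_map]
        apply List.map_congr_left
        intro kv hkv
        by_cases hkw : kv.1 = w
        · have hget : dc.getD w [] = kv.2 := by
            have hmem : (w, kv.2) ∈ dc.items := by
              have : kv = (w, kv.2) := by rw [← hkw]
              rw [← this]; exact hkv
            exact PySem.Dict.getD_of_mem_items dc hmem hdc []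
          have hwks : decide (w ∈ ks) = false := by simp [hw_notin]
          simp [Function.comp, hkw, hwks, hget, hc]
        · have hcont' : (f.erase w).contains kv.1 = f.contains kv.1 := contains_erase_of_ne f hkw
          have hgetD' : (f.erase w).getD kv.1 0 = f.getD kv.1 0 := getD_erase_of_ne f hkw 0
          have hmem' : decide (kv.1 ∈ w :: ks) = decide (kv.1 ∈ ks) := by
            simp [List.mem_cons, hkw]
          simp [Function.comp, show (kv.1 == w) = false by simp [hkw], hkw,
            hcont', hgetD', hmem']
      · rw [h2, items_erase, List.filter_filter]
        apply List.filter_congr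
        intro p _
        by_cases hpw : p.1 = w
        · simp [hpw]
        · simp [hpw]
    | false =>
      have hstep : sweepStep i (dc, f) w = (dc, f) := by
        unfold sweepStep
        rw [if_neg (by simp [hc])]
      obtain ⟨h1, h2⟩ := ih dc f hks' hdc hf (fun u hu => hall u (List.mem_cons_of_mem _ hu))
      simp only [List.foldl_cons, hstep]
      constructor
      · rw [h1]
        apply List.map_congr_left
        intro kv _
        by_cases hkw : kv.1 = w
        · simp [hkw, hc, hw_notin]
        · simp [List.mem_cons, hkw]
      · rw [h2]
        apply List.filter_congr
        intro p hp
        have hpw : p.1 ≠ w := by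
          intro h
          have := contains_of_mem_items f hp
          rw [h, hc] at this
          exact Bool.false_ne_true this
        simp [List.mem_cons, hpw]

-- bumpBy over the items of a dict with distinct keys is lookup-and-bump
theorem bumpBy_dict (i : Int) (f : PySem.Dict String Int) (hf : f.keys.Nodup)
    (kv : String × List Int) :
    bumpBy i f.items kv
      = if f.contains kv.1 then (kv.1, pyBump kv.2 i (f.getD kv.1 0)) else kv := by
  unfold bumpBy
  cases hfind : f.items.find? (fun p => p.1 == kv.1) with
  | some p =>
    have hmem : p ∈ f.items := List.mem_of_find?_eq_some hfind
    have hpk : p.1 = kv.1 := by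
      have := List.find?_some hfind
      simpa using this
    have hcont : f.contains kv.1 = true := hpk ▸ contains_of_mem_items f hmem
    have hget : f.getD kv.1 0 = p.2 := by
      have hmem' : (kv.1, p.2) ∈ f.items := by
        have : p = (kv.1, p.2) := by rw [← hpk]
        rw [← this]; exact hmem
      exact PySem.Dict.getD_of_mem_items f hmem' hf 0
    simp [hcont, hget]
  | none =>
    have hcont : f.contains kv.1 = false := by
      cases hcont : f.contains kv.1 with
      | false => rfl
      | true =>
        exfalso
        have hk : kv.1 ∈ f.keys := (PySem.Dict.contains_iff_mem_keys f kv.1).mp hcont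
        have : ∃ p ∈ f.items, p.1 = kv.1 := by
          have : f.keys = f.items.map Prod.fst := rfl
          rw [this] at hk
          simpa using hk
        obtain ⟨p, hp, hpk⟩ := this
        have := List.find?_eq_none.mp hfind p hp
        simp [hpk] at this
    simp [hcont]

-- fst is unchanged by the sweep's per-entry update
theorem map_fst_bump (c : String × List Int → Bool) (g : String × List Int → List Int)
    (l : List (String × List Int)) :
    (l.map (fun kv => if c kv = true then (kv.1, g kv) else kv)).map Prod.fst = l.map Prod.fst := by
  rw [List.map_map]
  apply List.map_congr_left
  intro kv _
  by_cases h : c kv = true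
  · simp [Function.comp, h]
  · simp [Function.comp, h]

-- ===== VERDICT (by name: the statement is the Claim_ definition above) =====
theorem UpdateWords_spec : Claim_equal_UpdateWords := by
  intro data clean_text length book_index _ hpre
  obtain ⟨hnd, _⟩ := hpre
  unfold Spec_UpdateWords UpdateWords UpdateWords_alt
  set L := length with hL
  set i := book_index with hi
  set d0 := PySem.Dict.mk data with hd0
  set freq := clean_text.foldl (fun f w => f.insert w (f.getD w 0 + 1)) (PySem.Dict.empty : PySem.Dict String Int) with hfreq
  have hfreqnd : freq.keys.Nodup := by
    rw [hfreq]
    exact PySem.Dict.nodup_keys_foldl_insert _ _ _ PySem.Dict.nodup_keys_empty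
  have hd0nd : d0.keys.Nodup := hnd
  have hksnd : d0.keys.Nodup := hd0nd
  -- A's fold equals the stepB fold over freq's items
  have hA : clean_text.foldl (stepA L i) d0 = freq.items.foldl (stepB L i) d0 := by
    have := main_lemma L i clean_text PySem.Dict.empty d0 PySem.Dict.nodup_keys_empty
    simpa using this.symm
  -- closed form of the A side
  have hAitems : (clean_text.foldl (stepA L i) d0).items
      = d0.items.map (fun kv => if freq.contains kv.1 then (kv.1, pyBump kv.2 i (freq.getD kv.1 0)) else kv)
        ++ (freq.items.filter (fun p => !(d0.contains p.1))).map
            (fun p => (p.1, pySetAt (List.replicate L.toNat 0) i p.2)) := by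
    rw [hA, foldl_stepB_items L i freq.items d0 hfreqnd hd0nd]
    congr 1
    apply List.map_congr_left
    intro kv _
    exact bumpBy_dict i freq hfreqnd kv
  -- closed form of B's sweep
  obtain ⟨h1, h2⟩ := sweep_items i d0.keys d0 freq hksnd hd0nd hfreqnd
    (fun w hw => (PySem.Dict.contains_iff_mem_keys d0 w).mpr hw)
  set st := d0.keys.foldl (sweepStep i) (d0, freq) with hst
  have h1' : st.1.items
      = d0.items.map (fun kv => if freq.contains kv.1 then (kv.1, pyBump kv.2 i (freq.getD kv.1 0)) else kv) := by
    rw [h1]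
    apply List.map_congr_left
    intro kv hkv
    have : decide (kv.1 ∈ d0.keys) = true := by
      simp [PySem.Dict.mem_keys_of_mem_items d0 hkv]
    rw [this, Bool.true_and]
  have h2' : st.2.items = freq.items.filter (fun p => !(d0.contains p.1)) := by
    rw [h2]
    apply List.filter_congr
    intro p _
    rw [PySem.Dict.contains_eq_decide_mem_keys]
  -- phase 3 appends: the leftover keys are fresh for st.1
  have hstkeys : st.1.keys = d0.keys := by
    have hk : st.1.keys = st.1.items.map Prod.fst := rfl
    rw [hk, h1', map_fst_bump (fun kv => freq.contains kv.1)
      (fun kv => pyBump kv.2 i (freq.getD kv.1 0)) d0.items]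
    rfl
  have hfresh : ∀ p ∈ st.2.items, st.1.contains p.1 = false := by
    intro p hp
    rw [h2'] at hp
    have hd0c : d0.contains p.1 = false := by
      have := List.of_mem_filter hp
      simpa using this
    rw [PySem.Dict.contains_eq_decide_mem_keys, hstkeys, ← PySem.Dict.contains_eq_decide_mem_keys]
    exact hd0c
  have hnodup2 : (st.2.items.map Prod.fst).Nodup := by
    rw [h2']
    exact List.Nodup.sublist (List.Sublist.map _ List.filter_sublist) hfreqnd
  have hphase3 : (st.2.items.foldl (growStep L i) st.1).items
      = st.1.items ++ st.2.items.map (fun p => (p.1, pySetAt (List.replicate L.toNat 0) i p.2)) := by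
    have hg : growStep L i = fun (dc : PySem.Dict String (List Int)) (p : String × Int) =>
        dc.insert p.1 (pySetAt (List.replicate L.toNat 0) i p.2) := rfl
    rw [hg]
    exact PySem.Dict.items_foldl_insert_fresh st.2.items Prod.fst
      (fun p => pySetAt (List.replicate L.toNat 0) i p.2) st.1 hfresh hnodup2
  simp only []
  rw [hAitems, hphase3, h1', h2']
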